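-- pv_equiv track=rewrite | github.com/seryrzu/unialigner | tandem_aligner/py/galign_blocks.py | get_compr_cigar
-- ===== SOURCE A (Python) =====
-- from collections import namedtuple
--
-- ComprBlock = namedtuple("ComprBlock", ["len1", "len2", "status"])
--
-- def get_compr_cigar(parsed_cigar):
--     compr_cigar = []
--     i = 0
--     while i < len(parsed_cigar):
--         _, block_status = parsed_cigar[i]
--         len1, len2 = 0, 0
--         while i < len(parsed_cigar):
--             length, status = parsed_cigar[i]
--             if block_status == status == "=":
--                 len1 += length
--                 len2 += length
--                 i += 1
--             elif block_status != "=" and status != "=":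
--                 if status == "X":
--                     len1 += length
--                     len2 += length
--                 elif status == "D":
--                     len2 += length
--                 else:
--                     assert status == "I"
--                     len1 += length
--                 i += 1
--             else:
--                 break
--         block_status = "=" if block_status == "=" else "X"
--         compr_cigar.append(ComprBlock(len1, len2, block_status))
--     return compr_cigar
-- ===== SOURCE B (Python) =====
-- from collections import namedtuple
--
-- ComprBlock = namedtuple("ComprBlock", ["len1", "len2", "status"])
--
-- def get_compr_cigar(parsed_cigar):
--     # single forward pass with a flush-on-key-change accumulator (no index, no nested loops)
--     compr_cigar = []
--     cur_key = None
--     len1, len2 = 0, 0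
--     for length, status in parsed_cigar:
--         key = status == "="
--         if cur_key is not None and key != cur_key:
--             compr_cigar.append(ComprBlock(len1, len2, "=" if cur_key else "X"))
--             len1, len2 = 0, 0
--         cur_key = key
--         if status in ("=", "X"):
--             len1 += length
--             len2 += length
--         elif status == "D":
--             len2 += length
--         else:
--             assert status == "I"
--             len1 += length
--     if cur_key is not None:
--         compr_cigar.append(ComprBlock(len1, len2, "=" if cur_key else "X"))
--     return compr_cigar
-- ===== Notes on version B (the rewrite author's own statement) =====
-- stated objective: simpler
-- what changed: Replaces A's index-driven nested while loops with a single forward pass that accumulates the current run and flushes a block whenever the equality-key of the status changes (plus one final flush).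
import Mathlib
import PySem

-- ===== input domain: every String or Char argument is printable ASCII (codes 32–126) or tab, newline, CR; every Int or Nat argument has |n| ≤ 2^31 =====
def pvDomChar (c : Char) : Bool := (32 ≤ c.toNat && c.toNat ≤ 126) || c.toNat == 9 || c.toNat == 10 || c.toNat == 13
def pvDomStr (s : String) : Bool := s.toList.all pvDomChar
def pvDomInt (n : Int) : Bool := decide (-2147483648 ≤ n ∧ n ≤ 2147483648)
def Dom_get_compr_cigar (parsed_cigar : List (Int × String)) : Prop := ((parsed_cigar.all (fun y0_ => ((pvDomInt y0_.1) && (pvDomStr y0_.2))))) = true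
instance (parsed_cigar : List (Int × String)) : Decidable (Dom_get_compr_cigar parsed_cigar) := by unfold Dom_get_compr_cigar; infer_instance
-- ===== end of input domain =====

-- B is a different decomposition (single pass with flush-on-key-change, no nested index loops); equivalence is for inputs
-- whose statuses are all in {"=","X","D","I"} (elsewhere Python's assert raises in both programs; the port drops the assert).

-- ===== PORT A =====
-- A's inner while loop: consumes elements of the current run, accumulating (len1, len2); returns them with the unconsumed rest.
-- Python's `assert status == "I"` raises on other statuses (excluded by Pre_); that else branch here just does len1 += length.
def aInner (bs : String) : List (Int × String) → Int → Int → Int × Int × List (Int × String)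
  | [], len1, len2 => (len1, len2, [])
  | (length, status) :: rest, len1, len2 =>
    if bs = "=" ∧ status = "=" then
      aInner bs rest (len1 + length) (len2 + length)
    else if bs ≠ "=" ∧ status ≠ "=" then
      if status = "X" then aInner bs rest (len1 + length) (len2 + length)
      else if status = "D" then aInner bs rest len1 (len2 + length)
      else aInner bs rest (len1 + length) len2
    else (len1, len2, (length, status) :: rest)

-- termination helper for the outer loop: the inner loop never grows the rest, and always consumes its own head
theorem aInner_length_le (bs : String) (lst : List (Int × String)) (l1 l2 : Int) :
    (aInner bs lst l1 l2).2.2.length ≤ lst.length := by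
  induction lst generalizing l1 l2 with
  | nil => simp [aInner]
  | cons p rest ih =>
    obtain ⟨length, status⟩ := p
    simp only [aInner]
    split_ifs <;> simp <;> exact Nat.le_succ_of_le (ih _ _)

theorem aInner_head_lt (bs : String) (length : Int) (rest : List (Int × String)) (l1 l2 : Int) :
    (aInner bs ((length, bs) :: rest) l1 l2).2.2.length < ((length, bs) :: rest).length := by
  simp only [aInner]
  split_ifs with h1 h2 h3 h4 <;>
    first
      | exact Nat.lt_succ_of_le (aInner_length_le bs rest _ _)
      | (exfalso; rcases Classical.em (bs = "=") with h | h <;> simp_all)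

-- A's outer while loop over the index i, one iteration per compressed block.
def aOuter : List (Int × String) → List (Int × Int × String)
  | [] => []
  | (length, bs) :: rest =>
    let r := aInner bs ((length, bs) :: rest) 0 0
    (r.1, r.2.1, if bs = "=" then "=" else "X") :: aOuter r.2.2
termination_by l => l.length
decreasing_by exact aInner_head_lt bs length rest 0 0

def get_compr_cigar (parsed_cigar : List (Int × String)) : List (Int × Int × String) :=
  aOuter parsed_cigar

-- ===== PORT B =====
-- one iteration of B's for loop; state = (compr_cigar, cur_key, len1, len2), cur_key : Option Bool (None before the first element)
def bStep (st : List (Int × Int × String) × Option Bool × Int × Int) (p : Int × String) :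
    List (Int × Int × String) × Option Bool × Int × Int :=
  let key : Bool := p.2 = "="
  let st' :=
    match st.2.1 with
    | some k => if key ≠ k then (st.1 ++ [(st.2.2.1, st.2.2.2, if k then "=" else "X")], (0 : Int), (0 : Int))
                else (st.1, st.2.2.1, st.2.2.2)
    | none => (st.1, st.2.2.1, st.2.2.2)
  if p.2 = "=" ∨ p.2 = "X" then (st'.1, some key, st'.2.1 + p.1, st'.2.2 + p.1)
  else if p.2 = "D" then (st'.1, some key, st'.2.1, st'.2.2 + p.1)
  else (st'.1, some key, st'.2.1 + p.1, st'.2.2)   -- Python asserts status == "I" here (excluded by Pre_)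

-- B's trailing flush after the loop
def bFinish (st : List (Int × Int × String) × Option Bool × Int × Int) : List (Int × Int × String) :=
  match st.2.1 with
  | none => st.1
  | some k => st.1 ++ [(st.2.2.1, st.2.2.2, if k then "=" else "X")]

def get_compr_cigar_alt (parsed_cigar : List (Int × String)) : List (Int × Int × String) :=
  bFinish (parsed_cigar.foldl bStep ([], none, 0, 0))

-- ===== PRECONDITION & SPEC =====
-- Pre_ excludes exactly the inputs on which Python A raises AssertionError: some status outside {"=","X","D","I"}.
def Pre_get_compr_cigar (parsed_cigar : List (Int × String)) : Prop :=
  ∀ p ∈ parsed_cigar, p.2 = "=" ∨ p.2 = "X" ∨ p.2 = "D" ∨ p.2 = "I"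
instance (parsed_cigar : List (Int × String)) : Decidable (Pre_get_compr_cigar parsed_cigar) := by unfold Pre_get_compr_cigar; infer_instance

def pvWitness_get_compr_cigar : (List (Int × String)) := [(3, "="), (1, "X"), (2, "D"), (4, "I"), (5, "=")]

def Spec_get_compr_cigar (parsed_cigar : List (Int × String)) (out : List (Int × Int × String)) : Prop := out = get_compr_cigar_alt parsed_cigar
instance (parsed_cigar : List (Int × String)) (out : List (Int × Int × String)) : Decidable (Spec_get_compr_cigar parsed_cigar out) := by unfold Spec_get_compr_cigar; infer_instance

-- ===== CLAIM (what is proved, stated in full; the proofs are below) =====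
def Claim_equal_get_compr_cigar : Prop := ∀ (parsed_cigar : List (Int × String)), Dom_get_compr_cigar parsed_cigar → Pre_get_compr_cigar parsed_cigar → Spec_get_compr_cigar parsed_cigar (get_compr_cigar parsed_cigar)

-- ===== LEMMAS AND PROOFS =====

-- B's loop-body state update without a previous key equals the one with any matching key (no flush either way)
theorem bstep_none (compr : List (Int × Int × String)) (l1 l2 : Int) (p : Int × String) :
    bStep (compr, none, l1, l2) p = bStep (compr, some (decide (p.2 = "=")), l1, l2) p := by
  simp [bStep]

-- When the element's key matches the run key, B's step and A's inner-loop step perform the same accumulation.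
theorem consume (bs : String) (length : Int) (status : String) (rest : List (Int × String)) (l1 l2 : Int)
    (h : (status = "=") ↔ (bs = "=")) :
    ∃ A1 A2 : Int,
      (∀ compr : List (Int × Int × String),
        bStep (compr, some (decide (bs = "=")), l1, l2) (length, status) = (compr, some (decide (bs = "=")), A1, A2))
      ∧ aInner bs ((length, status) :: rest) l1 l2 = aInner bs rest A1 A2 := by
  by_cases hst : status = "="
  · have hbs : bs = "=" := h.mp hst
    exact ⟨l1 + length, l2 + length, fun compr => by simp [bStep, hst, hbs], by simp [aInner, hst, hbs]⟩
  · have hbs : ¬ bs = "=" := fun hb => hst (h.mpr hb)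
    by_cases hX : status = "X"
    · exact ⟨l1 + length, l2 + length, fun compr => by simp [bStep, hX, hbs],
        by simp [aInner, hX, hbs]⟩
    · by_cases hD : status = "D"
      · exact ⟨l1, l2 + length, fun compr => by simp [bStep, hD, hbs],
          by simp [aInner, hD, hbs]⟩
      · exact ⟨l1 + length, l2, fun compr => by simp [bStep, hst, hX, hD, hbs],
          by simp [aInner, hst, hX, hD, hbs]⟩

-- Main invariant: B's fold, started mid-run with cur_key = (bs == "="), flushes exactly the block A's inner
-- loop computes and then continues as A's outer loop on the unconsumed rest.
theorem main_inv (lst : List (Int × String)) : ∀ (bs : String) (compr : List (Int × Int × String)) (l1 l2 : Int),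
    bFinish (List.foldl bStep (compr, some (decide (bs = "=")), l1, l2) lst)
    = compr ++ ((aInner bs lst l1 l2).1, (aInner bs lst l1 l2).2.1, if bs = "=" then "=" else "X")
        :: aOuter (aInner bs lst l1 l2).2.2 := by
  induction lst with
  | nil => intro bs compr l1 l2; simp [aInner, bFinish, aOuter]
  | cons p rest ih =>
    intro bs compr l1 l2
    obtain ⟨length, status⟩ := p
    by_cases hk : (status = "=") ↔ (bs = "=")
    · -- same run: both sides consume the element with identical accumulation
      obtain ⟨A1, A2, hb, ha⟩ := consume bs length status rest l1 l2 hk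
      rw [List.foldl_cons, hb compr, ha]
      exact ih bs compr A1 A2
    · -- run boundary: B flushes and starts a new run; A's inner loop stops and the outer loop restarts here
      have hstop : aInner bs ((length, status) :: rest) l1 l2 = (l1, l2, (length, status) :: rest) := by
        by_cases hbs : bs = "=" <;> simp_all [aInner]
      have hflush : List.foldl bStep (compr, some (decide (bs = "=")), l1, l2) ((length, status) :: rest)
          = List.foldl bStep (compr ++ [(l1, l2, if bs = "=" then "=" else "X")], some (decide (status = "=")), 0, 0)
              ((length, status) :: rest) := by
        simp only [List.foldl_cons]
        have h1 : bStep (compr, some (decide (bs = "=")), l1, l2) (length, status)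
            = bStep (compr ++ [(l1, l2, if bs = "=" then "=" else "X")], some (decide (status = "=")), 0, 0)
                (length, status) := by
          by_cases hbs : bs = "=" <;> by_cases hst : status = "=" <;> simp_all [bStep]
        rw [h1]
      obtain ⟨A1, A2, hb, ha⟩ := consume status length status rest 0 0 Iff.rfl
      rw [hstop, hflush, List.foldl_cons, hb, aOuter, ha,
        ih status (compr ++ [(l1, l2, if bs = "=" then "=" else "X")]) A1 A2]
      simp

-- ===== VERDICT (by name: the statement is the Claim_ definition above) =====
theorem get_compr_cigar_spec : Claim_equal_get_compr_cigar := by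
  intro parsed_cigar _ _
  unfold Spec_get_compr_cigar get_compr_cigar get_compr_cigar_alt
  cases parsed_cigar with
  | nil => simp [aOuter, bFinish]
  | cons p rest =>
    obtain ⟨length, status⟩ := p
    obtain ⟨A1, A2, hb, ha⟩ := consume status length status rest 0 0 Iff.rfl
    rw [List.foldl_cons, bstep_none, hb, aOuter, ha,
      main_inv rest status [] A1 A2]
    simp
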